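-- pv_equiv track=rewrite | github.com/toxic-byte/learn | Clock.py | count_ways_dp
-- ===== SOURCE A (Python) =====
-- def count_ways_dp(n):
--     if n == 0:
--         return 1  # 0步时只有一种方案（不动）
--     if n % 2 != 0:
--         return 0  # 奇数步无法回到起点
--
--     # dp[i][j]：走i步后停在j点的方案数
--     dp = [[0] * 12 for _ in range(n + 1)]
--     dp[0][0] = 1  # 初始状态
--
--     for step in range(1, n + 1):
--         for pos in range(12):
--             # 上一步可能是 pos-1（顺时针）或 pos+1（逆时针）
--             prev_clockwise = (pos - 1) % 12
--             prev_counterclockwise = (pos + 1) % 12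
--             dp[step][pos] = dp[step - 1][prev_clockwise] + dp[step - 1][prev_counterclockwise]
--
--     return dp[n][0]
-- ===== SOURCE B (Python) =====
-- def count_ways_dp(n):
--     if n == 0:
--         return 1
--     if n % 2 != 0:
--         return 0
--     # B: the state vector after k steps is (x + x^11)^k in the ring Z[x]/(x^12 - 1);
--     # compute it by exponentiation by squaring.
--     e = [1] + [0] * 11            # identity: zero steps
--     g = [0, 1] + [0] * 9 + [1]    # one step: +1 or -1 on the 12-cycle
--
--     def conv(a, b):               # cyclic convolution mod 12
--         return [sum(a[i] * b[(t - i) % 12] for i in range(12)) for t in range(12)]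
--
--     def power(k):                 # (x + x^11)^k by squaring
--         if k == 0:
--             return e
--         h = power(k // 2)
--         hh = conv(h, h)
--         return conv(hh, g) if k % 2 else hh
--
--     return power(n)[0]
-- ===== Notes on version B (the rewrite author's own statement) =====
-- stated objective: alternative
-- what changed: Replaces the step-by-step 12-point DP table (n iterations) with exponentiation by squaring of the one-step generator in the ring Z[x]/(x^12-1), i.e. O(log n) cyclic convolutions of 12-vectors.
import Mathlib
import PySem

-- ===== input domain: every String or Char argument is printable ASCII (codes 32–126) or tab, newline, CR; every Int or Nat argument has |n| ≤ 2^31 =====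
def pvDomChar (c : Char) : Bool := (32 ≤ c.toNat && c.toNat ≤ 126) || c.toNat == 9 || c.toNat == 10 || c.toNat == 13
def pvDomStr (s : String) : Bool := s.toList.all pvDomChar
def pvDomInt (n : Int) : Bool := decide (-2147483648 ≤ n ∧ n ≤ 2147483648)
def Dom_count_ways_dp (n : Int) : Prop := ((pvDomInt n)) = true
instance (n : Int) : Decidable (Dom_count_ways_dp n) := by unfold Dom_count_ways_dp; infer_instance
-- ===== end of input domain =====

-- B replaces A's step-by-step 12-point DP table with binary exponentiation of the
-- one-step generator in Z[x]/(x^12 - 1) (cyclic-convolution squaring).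

-- ===== PORT A =====
-- one row of A's dp table: dp[step][pos] = dp[step-1][(pos-1)%12] + dp[step-1][(pos+1)%12]
def pvRowA (prev : List Int) : List Int :=
  (List.range 12).map (fun pos =>
    prev.getD (((pos : Int) - 1) % 12).toNat 0 + prev.getD (((pos : Int) + 1) % 12).toNat 0)

def count_ways_dp (n : Int) : Int :=
  if n = 0 then 1
  else if ¬ (n % 2 = 0) then 0
  else
    -- the fill loop: row `step` is computed from row `step-1`; the table is kept whole
    let m := n.toNat
    let row0 : List Int := (List.replicate 12 (0 : Int)).set 0 1
    let dp := (List.range' 1 m).foldl (fun dp step => dp ++ [pvRowA (dp.getD (step - 1) [])]) [row0]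
    (dp.getD m []).getD 0 0

-- ===== PORT B =====
-- a 12-vector (Source B's list of 12 ints, fields c0..c11)
structure V12 where
  (c0 c1 c2 c3 c4 c5 c6 c7 c8 c9 c10 c11 : Int)
  deriving Repr, DecidableEq

def pvE : V12 := ⟨1,0,0,0,0,0,0,0,0,0,0,0⟩      -- e = [1]+[0]*11
def pvG : V12 := ⟨0,1,0,0,0,0,0,0,0,0,0,1⟩      -- g = [0,1]+[0]*9+[1]

-- cyclic convolution mod 12 (Source B's conv, the fixed-size double loop unrolled; exact)
def pvConv (a b : V12) : V12 :=
  ⟨(a.c0 * b.c0 + a.c1 * b.c11 + a.c2 * b.c10 + a.c3 * b.c9 + a.c4 * b.c8 + a.c5 * b.c7 + a.c6 * b.c6 + a.c7 * b.c5 + a.c8 * b.c4 + a.c9 * b.c3 + a.c10 * b.c2 + a.c11 * b.c1),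
    (a.c0 * b.c1 + a.c1 * b.c0 + a.c2 * b.c11 + a.c3 * b.c10 + a.c4 * b.c9 + a.c5 * b.c8 + a.c6 * b.c7 + a.c7 * b.c6 + a.c8 * b.c5 + a.c9 * b.c4 + a.c10 * b.c3 + a.c11 * b.c2),
    (a.c0 * b.c2 + a.c1 * b.c1 + a.c2 * b.c0 + a.c3 * b.c11 + a.c4 * b.c10 + a.c5 * b.c9 + a.c6 * b.c8 + a.c7 * b.c7 + a.c8 * b.c6 + a.c9 * b.c5 + a.c10 * b.c4 + a.c11 * b.c3),
    (a.c0 * b.c3 + a.c1 * b.c2 + a.c2 * b.c1 + a.c3 * b.c0 + a.c4 * b.c11 + a.c5 * b.c10 + a.c6 * b.c9 + a.c7 * b.c8 + a.c8 * b.c7 + a.c9 * b.c6 + a.c10 * b.c5 + a.c11 * b.c4),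
    (a.c0 * b.c4 + a.c1 * b.c3 + a.c2 * b.c2 + a.c3 * b.c1 + a.c4 * b.c0 + a.c5 * b.c11 + a.c6 * b.c10 + a.c7 * b.c9 + a.c8 * b.c8 + a.c9 * b.c7 + a.c10 * b.c6 + a.c11 * b.c5),
    (a.c0 * b.c5 + a.c1 * b.c4 + a.c2 * b.c3 + a.c3 * b.c2 + a.c4 * b.c1 + a.c5 * b.c0 + a.c6 * b.c11 + a.c7 * b.c10 + a.c8 * b.c9 + a.c9 * b.c8 + a.c10 * b.c7 + a.c11 * b.c6),
    (a.c0 * b.c6 + a.c1 * b.c5 + a.c2 * b.c4 + a.c3 * b.c3 + a.c4 * b.c2 + a.c5 * b.c1 + a.c6 * b.c0 + a.c7 * b.c11 + a.c8 * b.c10 + a.c9 * b.c9 + a.c10 * b.c8 + a.c11 * b.c7),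
    (a.c0 * b.c7 + a.c1 * b.c6 + a.c2 * b.c5 + a.c3 * b.c4 + a.c4 * b.c3 + a.c5 * b.c2 + a.c6 * b.c1 + a.c7 * b.c0 + a.c8 * b.c11 + a.c9 * b.c10 + a.c10 * b.c9 + a.c11 * b.c8),
    (a.c0 * b.c8 + a.c1 * b.c7 + a.c2 * b.c6 + a.c3 * b.c5 + a.c4 * b.c4 + a.c5 * b.c3 + a.c6 * b.c2 + a.c7 * b.c1 + a.c8 * b.c0 + a.c9 * b.c11 + a.c10 * b.c10 + a.c11 * b.c9),
    (a.c0 * b.c9 + a.c1 * b.c8 + a.c2 * b.c7 + a.c3 * b.c6 + a.c4 * b.c5 + a.c5 * b.c4 + a.c6 * b.c3 + a.c7 * b.c2 + a.c8 * b.c1 + a.c9 * b.c0 + a.c10 * b.c11 + a.c11 * b.c10),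
    (a.c0 * b.c10 + a.c1 * b.c9 + a.c2 * b.c8 + a.c3 * b.c7 + a.c4 * b.c6 + a.c5 * b.c5 + a.c6 * b.c4 + a.c7 * b.c3 + a.c8 * b.c2 + a.c9 * b.c1 + a.c10 * b.c0 + a.c11 * b.c11),
    (a.c0 * b.c11 + a.c1 * b.c10 + a.c2 * b.c9 + a.c3 * b.c8 + a.c4 * b.c7 + a.c5 * b.c6 + a.c6 * b.c5 + a.c7 * b.c4 + a.c8 * b.c3 + a.c9 * b.c2 + a.c10 * b.c1 + a.c11 * b.c0)⟩

-- power(k): exponentiation by squaring, k//2 recursion (Source B's power)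
def pvPower : Nat → V12
  | 0 => pvE
  | (k+1) =>
    let h := pvPower ((k+1) / 2)
    let hh := pvConv h h
    if (k+1) % 2 = 1 then pvConv hh pvG else hh
decreasing_by exact Nat.div_lt_self (Nat.succ_pos k) (by omega)

def count_ways_dp_alt (n : Int) : Int :=
  if n = 0 then 1
  else if ¬ (n % 2 = 0) then 0
  else (pvPower n.toNat).c0

-- ===== PRECONDITION & SPEC =====
-- A raises IndexError on negative even n (its dp table is built empty); B's recursion
-- does not terminate there either: Pre_ admits exactly the inputs where A returns.
def Pre_count_ways_dp (n : Int) : Prop := 0 ≤ n ∨ ¬ (n % 2 = 0)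
instance (n : Int) : Decidable (Pre_count_ways_dp n) := by unfold Pre_count_ways_dp; infer_instance
def pvWitness_count_ways_dp : Int := 8

def Spec_count_ways_dp (n : Int) (out : Int) : Prop := out = count_ways_dp_alt n
instance (n : Int) (out : Int) : Decidable (Spec_count_ways_dp n out) := by unfold Spec_count_ways_dp; infer_instance

-- ===== CLAIM (what is proved, stated in full; the proofs are below) =====
def Claim_equal_count_ways_dp : Prop := ∀ (n : Int), Dom_count_ways_dp n → Pre_count_ways_dp n → Spec_count_ways_dp n (count_ways_dp n)

-- ===== LEMMAS AND PROOFS =====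

-- the exact state vector after k steps (mathematical reference for both ports)
def pvRow : Nat → V12
  | 0 => pvE
  | (k+1) => pvConv (pvRow k) pvG

theorem pvConv_e (a : V12) : pvConv a pvE = a := by
  cases a; simp [pvConv, pvE]

theorem pvConv_g_assoc (a b : V12) : pvConv a (pvConv b pvG) = pvConv (pvConv a b) pvG := by
  cases a; cases b
  simp only [pvConv, pvG, V12.mk.injEq]
  refine ⟨by ring, by ring, by ring, by ring, by ring, by ring,
          by ring, by ring, by ring, by ring, by ring, by ring⟩

theorem pvRow_add (a b : Nat) : pvConv (pvRow a) (pvRow b) = pvRow (a + b) := by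
  induction b with
  | zero => simp [pvRow, pvConv_e]
  | succ b ih =>
      show pvConv (pvRow a) (pvConv (pvRow b) pvG) = pvRow (a + b + 1)
      rw [pvConv_g_assoc, ih]; rfl

theorem pvPower_eq (k : Nat) : pvPower k = pvRow k := by
  induction k using Nat.strong_induction_on with
  | _ k ih =>
    match k with
    | 0 => simp [pvPower, pvRow]
    | (k+1) =>
      rw [pvPower, ih ((k+1)/2) (Nat.div_lt_self (Nat.succ_pos k) (by omega))]
      by_cases h : (k+1) % 2 = 1
      · simp only [h]
        have : (k+1) / 2 + (k+1) / 2 + 1 = k + 1 := by omega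
        calc pvConv (pvConv (pvRow ((k+1)/2)) (pvRow ((k+1)/2))) pvG
            = pvConv (pvRow ((k+1)/2 + (k+1)/2)) pvG := by rw [pvRow_add]
          _ = pvRow ((k+1)/2 + (k+1)/2 + 1) := rfl
          _ = pvRow (k+1) := by rw [this]
      · simp only [if_neg h]
        have h2 : (k+1) / 2 + (k+1) / 2 = k + 1 := by omega
        rw [pvRow_add, h2]

-- A's row update applied to a materialised row equals one convolution with the generator
def pvToList (v : V12) : List Int :=
  [v.c0, v.c1, v.c2, v.c3, v.c4, v.c5, v.c6, v.c7, v.c8, v.c9, v.c10, v.c11]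

theorem pvRowA_eq (w : V12) : pvRowA (pvToList w) = pvToList (pvConv w pvG) := by
  cases w
  simp only [pvRowA, pvToList, pvConv, pvG,
    show List.range 12 = [0,1,2,3,4,5,6,7,8,9,10,11] from rfl]
  norm_num
  simp only [show ((0:Int).toNat)=0 from rfl, show ((1:Int).toNat)=1 from rfl, show ((2:Int).toNat)=2 from rfl, show ((3:Int).toNat)=3 from rfl, show ((4:Int).toNat)=4 from rfl, show ((5:Int).toNat)=5 from rfl, show ((6:Int).toNat)=6 from rfl, show ((7:Int).toNat)=7 from rfl, show ((8:Int).toNat)=8 from rfl, show ((9:Int).toNat)=9 from rfl, show ((10:Int).toNat)=10 from rfl, show ((11:Int).toNat)=11 from rfl, List.getElem_cons_succ, List.getElem_cons_zero]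
  ring_nf
  simp

-- the fill loop builds exactly the rows pvRow 0 .. pvRow m
theorem pvFold_eq (m : Nat) :
    (List.range' 1 m).foldl (fun dp step => dp ++ [pvRowA (dp.getD (step - 1) [])])
      [(List.replicate 12 (0 : Int)).set 0 1]
    = (List.range (m + 1)).map (fun j => pvToList (pvRow j)) := by
  induction m with
  | zero => decide
  | succ m ih =>
      rw [List.range'_concat, List.foldl_append, ih]
      simp only [List.foldl_cons, List.foldl_nil]
      have hget : ((List.range (m + 1)).map (fun j => pvToList (pvRow j))).getD (1 + 1 * m - 1) []
          = pvToList (pvRow m) := by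
        have h : 1 + 1 * m - 1 = m := by omega
        rw [h, List.getD_eq_getElem?_getD]
        simp
      rw [hget, pvRowA_eq]
      rw [List.range_succ (n := m + 1), List.map_append]
      simp [pvRow]

-- ===== VERDICT (by name: the statement is the Claim_ definition above) =====
theorem count_ways_dp_spec : Claim_equal_count_ways_dp := by
  intro n _ hpre
  unfold Spec_count_ways_dp count_ways_dp count_ways_dp_alt
  by_cases h0 : n = 0
  · simp [h0]
  · by_cases h2 : n % 2 = 0
    · simp only [h0, h2, if_neg, not_true_eq_false, not_false_eq_true]
      have hn : 0 < n := by
        rcases hpre with h | h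
        · omega
        · exact absurd h2 h
      simp only [pvFold_eq]
      have hm : 0 < n.toNat := by omega
      rw [List.getD_eq_getElem?_getD]
      simp [pvPower_eq, pvToList, List.getD]
    · simp [h0, h2]
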